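-- pv_equiv track=rewrite | github.com/Prodigysec/Dice-Rolls | solution.py | solution
-- ===== SOURCE A (Python) =====
-- def solution(A, F, M):
--     missedRolls = []
--
--     noOfRolls = len(A) + F
--
--     arrayF = (noOfRolls * M) - sum(A)
--
--     initialValue = arrayF
--
--     while initialValue > 0:
--         subtractedValue = min(initialValue, 6)
--         missedRolls.append(subtractedValue)
--         initialValue -= subtractedValue
--     return missedRolls
-- ===== SOURCE B (Python) =====
-- def solution(A, F, M):
--     v = (len(A) + F) * M - sum(A)
--     if v <= 0:
--         return []
--     count, rem = divmod(v, 6)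
--     return [6] * count + ([rem] if rem else [])
-- ===== Notes on version B (the rewrite author's own statement) =====
-- stated objective: simpler
-- what changed: Replaces the repeated-subtraction while loop with a single closed-form divmod decomposition: v//6 copies of 6 plus the nonzero remainder.
import Mathlib
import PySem

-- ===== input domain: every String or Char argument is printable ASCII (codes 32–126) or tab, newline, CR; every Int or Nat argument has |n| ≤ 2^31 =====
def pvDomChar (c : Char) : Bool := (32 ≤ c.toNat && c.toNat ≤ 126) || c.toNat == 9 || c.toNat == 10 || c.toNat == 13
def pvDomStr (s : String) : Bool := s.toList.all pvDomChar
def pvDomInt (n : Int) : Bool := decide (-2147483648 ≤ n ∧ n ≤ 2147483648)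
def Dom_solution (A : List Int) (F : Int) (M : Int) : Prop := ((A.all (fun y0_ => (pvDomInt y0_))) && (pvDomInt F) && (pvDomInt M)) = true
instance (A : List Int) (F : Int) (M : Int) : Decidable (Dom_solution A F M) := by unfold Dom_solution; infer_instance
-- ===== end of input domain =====

-- B replaces A's repeated-subtraction while loop by a closed-form divmod decomposition (objective: simpler).

-- ===== PORT A =====
-- the while loop: append min(initialValue, 6) and subtract until initialValue ≤ 0
def solLoopA (missedRolls : List Int) (initialValue : Int) : List Int :=
  if 0 < initialValue then
    solLoopA (missedRolls ++ [min initialValue 6]) (initialValue - min initialValue 6)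
  else missedRolls
termination_by initialValue.toNat
decreasing_by omega

def solution (A : List Int) (F : Int) (M : Int) : List Int :=
  let noOfRolls : Int := (A.length : Int) + F
  let arrayF : Int := noOfRolls * M - A.sum
  solLoopA [] arrayF

-- ===== PORT B =====
def solution_alt (A : List Int) (F : Int) (M : Int) : List Int :=
  let v : Int := ((A.length : Int) + F) * M - A.sum
  if v ≤ 0 then []
  else
    let count : Int := PySem.Int.floordiv v 6
    let rem : Int := PySem.Int.mod v 6
    List.replicate count.toNat 6 ++ (if rem ≠ 0 then [rem] else [])

-- ===== PRECONDITION & SPEC =====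
def Spec_solution (A : List Int) (F : Int) (M : Int) (out : List Int) : Prop := out = solution_alt A F M
instance (A : List Int) (F : Int) (M : Int) (out : List Int) : Decidable (Spec_solution A F M out) := by unfold Spec_solution; infer_instance

-- ===== CLAIM (what is proved, stated in full; the proofs are below) =====
def Claim_equal_solution : Prop := ∀ (A : List Int) (F : Int) (M : Int), Dom_solution A F M → Spec_solution A F M (solution A F M)

-- ===== LEMMAS AND PROOFS =====

-- closed form of B's branch body, as a function of v alone (proof-side helper)
def altBody (v : Int) : List Int :=
  if v ≤ 0 then []
  else List.replicate (PySem.Int.floordiv v 6).toNat 6 ++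
       (if PySem.Int.mod v 6 ≠ 0 then [PySem.Int.mod v 6] else [])

theorem solLoopA_eq_altBody (n : Nat) :
    ∀ v : Int, v.toNat ≤ n → ∀ acc : List Int, solLoopA acc v = acc ++ altBody v := by
  induction n with
  | zero =>
    intro v hv acc
    have hv0 : v ≤ 0 := by omega
    rw [solLoopA]
    simp [altBody, hv0, not_lt.mpr hv0]
  | succ n ih =>
    intro v hv acc
    by_cases hpos : 0 < v
    · rw [solLoopA, if_pos hpos]
      rw [altBody, if_neg (by omega)]
      rw [PySem.Int.floordiv_eq_ediv_of_pos (by omega : (0:Int) < 6),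
          PySem.Int.mod_eq_emod_of_pos (by omega : (0:Int) < 6)]
      by_cases hle : v ≤ 6
      · have hmin : min v 6 = v := by omega
        rw [hmin]
        have hz : v - v = (0 : Int) := by ring
        rw [hz, solLoopA]
        simp only [lt_irrefl, if_false]
        by_cases h6 : v = 6
        · subst h6; norm_num
        · have hdiv : v / 6 = 0 := by omega
          have hmod : v % 6 = v := by omega
          rw [hdiv, hmod]
          simp [ne_of_gt hpos]
      · have hmin : min v 6 = (6 : Int) := by omega
        rw [hmin]
        rw [ih (v - 6) (by omega) (acc ++ [6])]
        rw [List.append_assoc]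
        congr 1
        rw [altBody, if_neg (by omega)]
        rw [PySem.Int.floordiv_eq_ediv_of_pos (by omega : (0:Int) < 6),
            PySem.Int.mod_eq_emod_of_pos (by omega : (0:Int) < 6)]
        have hq : v / 6 = (v - 6) / 6 + 1 := by omega
        have hqn : ((v - 6) / 6 + 1).toNat = ((v - 6) / 6).toNat + 1 := by omega
        have hm : v % 6 = (v - 6) % 6 := by omega
        rw [hq, hm, hqn, List.replicate_succ]
        simp
    · rw [solLoopA, if_neg hpos]
      have : v ≤ 0 := by omega
      simp [altBody, this]

-- ===== VERDICT (by name: the statement is the Claim_ definition above) =====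
theorem solution_spec : Claim_equal_solution := by
  intro A F M _
  show solution A F M = solution_alt A F M
  unfold solution solution_alt
  rw [solLoopA_eq_altBody (((A.length : Int) + F) * M - A.sum).toNat _ le_rfl]
  simp [altBody]
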